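-- pv_equiv track=rewrite | github.com/Mark2797/2048_AI_Game_Solver | PlayerAI_3.py | chain_score
-- ===== SOURCE A (Python) =====
-- def chain_score(board):
--     output = 0
--     for row in range(4):
--         for col in range(4):
--             chain_continues = True
--             row_temp = row
--             col_temp = col
--             while(chain_continues):
--                 # Make array of all horizontal and vertical neighbors (see value_similarity() for logic behind list comprehension)
--                 shifts = [-1, 0, 1]
--                 neighbor_coords = [[row_temp + shifts[i], col_temp + shifts[j]] for j in range(3) for i in range(3) if ((shifts[i] != 0 and shifts[j] == 0) or (shifts[i] == 0 and shifts[j] != 0)) and (row_temp + shifts[i] >= 0 and col_temp + shifts[j] >= 0) and (row_temp + shifts[i] < 4 and col_temp + shifts[j] < 4)]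
--                 neighbor_vals = [board[i][j] for (i,j) in neighbor_coords]
--
--                 # Check whether the chain continues and move on to next in chain if so
--                 if (2 * board[row_temp][col_temp] in neighbor_vals) and (board[row_temp][col_temp] != 0):
--                     output += 1
--                     next_in_chain = neighbor_coords[neighbor_vals.index(2 * board[row_temp][col_temp])]
--                     (row_temp, col_temp) = (next_in_chain[0], next_in_chain[1])
--                 else:
--                     chain_continues = False
--
--     return output
-- ===== SOURCE B (Python) =====
-- def chain_score(board):
--     # Process cells in decreasing |value| order; since the successor of a chain
--     # step always holds twice the (nonzero) value, its length is already known
--     # when a cell is processed, so one pass over a table replaces per-cell walks.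
--     cells = [(r, c) for r in range(4) for c in range(4)]
--     order = sorted(cells, key=lambda rc: -abs(board[rc[0]][rc[1]]))
--     lens = {}
--     for (r, c) in order:
--         v = board[r][c]
--         lens[(r, c)] = 0
--         if v != 0:
--             for (i, j) in [(r, c - 1), (r - 1, c), (r + 1, c), (r, c + 1)]:
--                 if 0 <= i < 4 and 0 <= j < 4 and board[i][j] == 2 * v:
--                     lens[(r, c)] = 1 + lens[(i, j)]
--                     break
--     return sum(lens[cell] for cell in cells)
-- ===== Notes on version B (the rewrite author's own statement) =====
-- stated objective: alternative
-- what changed: A re-walks the doubling chain from each of the 16 cells (rebuilding the neighbor list at every step); B sorts the cells by decreasing absolute value and fills a chain-length table in one pass (the successor of a chain step holds twice a nonzero value, so its length is already tabulated), returning the table's sum.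
import Mathlib
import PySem

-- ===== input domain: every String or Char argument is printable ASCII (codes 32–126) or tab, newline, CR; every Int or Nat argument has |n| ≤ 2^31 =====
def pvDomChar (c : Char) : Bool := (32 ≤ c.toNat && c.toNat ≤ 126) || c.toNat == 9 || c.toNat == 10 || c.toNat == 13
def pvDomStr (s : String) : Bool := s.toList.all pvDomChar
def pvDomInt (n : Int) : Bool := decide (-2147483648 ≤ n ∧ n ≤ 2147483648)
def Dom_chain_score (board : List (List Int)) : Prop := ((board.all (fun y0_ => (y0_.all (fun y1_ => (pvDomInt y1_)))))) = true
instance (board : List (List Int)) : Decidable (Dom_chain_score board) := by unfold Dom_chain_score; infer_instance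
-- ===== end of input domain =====

-- B replaces A's per-cell chain walks by one pass over the cells in decreasing |value|
-- order, filling a table of chain lengths (the successor of a chain step holds twice a
-- nonzero value, so its length is already tabulated); objective: alternative algorithm.

-- ===== PORT A =====
-- board[i][j]; the default is only reached on inputs excluded by Pre_ (Python raises IndexError there)
def pvVal (board : List (List Int)) (r c : Int) : Int :=
  PySem.List.pyGetD (PySem.List.pyGetD board r []) c 0

def pvShifts : List Int := [-1, 0, 1]

-- the neighbor_coords comprehension: [[rt+shifts[i], ct+shifts[j]] for j in range(3) for i in range(3) if …]
def pvACoords (rt ct : Int) : List (Int × Int) :=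
  (PySem.List.pyRange 0 3 1).flatMap (fun j =>
    ((PySem.List.pyRange 0 3 1).filter (fun i =>
        decide (((PySem.List.pyGetD pvShifts i 0 ≠ 0 ∧ PySem.List.pyGetD pvShifts j 0 = 0) ∨
                 (PySem.List.pyGetD pvShifts i 0 = 0 ∧ PySem.List.pyGetD pvShifts j 0 ≠ 0)) ∧
                (rt + PySem.List.pyGetD pvShifts i 0 ≥ 0 ∧ ct + PySem.List.pyGetD pvShifts j 0 ≥ 0) ∧
                (rt + PySem.List.pyGetD pvShifts i 0 < 4 ∧ ct + PySem.List.pyGetD pvShifts j 0 < 4)))).map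
      (fun i => (rt + PySem.List.pyGetD pvShifts i 0, ct + PySem.List.pyGetD pvShifts j 0)))

-- the while loop; fuel 17 never runs out: each iteration moves to a cell holding twice the
-- previous nonzero value, so the visited cells of the 4x4 block are distinct (≤ 16 iterations)
def pvALoop (board : List (List Int)) : Nat → Int → Int → Int → Int
  | 0, _, _, out => out
  | f+1, rt, ct, out =>
    let coords := pvACoords rt ct
    let vals := coords.map (fun p => pvVal board p.1 p.2)
    if 2 * pvVal board rt ct ∈ vals ∧ pvVal board rt ct ≠ 0 then
      -- neighbor_vals.index(…): membership was just checked, so index? is some (getD 0 unused)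
      let k : Nat := (PySem.List.index? vals (2 * pvVal board rt ct)).getD 0
      let nx := PySem.List.pyGetD coords (k : Int) ((0 : Int), (0 : Int))
      pvALoop board f nx.1 nx.2 (out + 1)
    else out

def chain_score (board : List (List Int)) : Int :=
  (PySem.List.pyRange 0 4 1).foldl (fun out row =>
    (PySem.List.pyRange 0 4 1).foldl (fun out col =>
      pvALoop board 17 row col out) out) 0

-- ===== PORT B =====
def pvBCells : List (Int × Int) :=
  (PySem.List.pyRange 0 4 1).flatMap (fun r => (PySem.List.pyRange 0 4 1).map (fun c => (r, c)))

def pvBOrder (board : List (List Int)) : List (Int × Int) :=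
  PySem.List.sorted pvBCells (fun rc => -|pvVal board rc.1 rc.2|) false

-- one iteration of B's table-filling loop (the inner for/break is find?)
def pvBStep (board : List (List Int)) (d : PySem.Dict (Int × Int) Int) (rc : Int × Int) :
    PySem.Dict (Int × Int) Int :=
  let v := pvVal board rc.1 rc.2
  let d0 := d.insert rc 0
  if v ≠ 0 then
    match [(rc.1, rc.2 - 1), (rc.1 - 1, rc.2), (rc.1 + 1, rc.2), (rc.1, rc.2 + 1)].find?
        (fun p => decide (0 ≤ p.1 ∧ p.1 < 4 ∧ 0 ≤ p.2 ∧ p.2 < 4 ∧ pvVal board p.1 p.2 = 2 * v)) with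
    | some q => d0.insert rc (1 + d0.getD q 0)
    | none => d0
  else d0

def chain_score_alt (board : List (List Int)) : Int :=
  let lens := (pvBOrder board).foldl (pvBStep board) PySem.Dict.empty
  -- lens[cell]: every cell was inserted by the loop, so the default 0 is never used
  pvBCells.foldl (fun s rc => s + lens.getD rc 0) 0

-- ===== PRECONDITION & SPEC =====
-- Pre_ excludes exactly the boards on which Python's board[i][j] (i, j ∈ 0..3) raises IndexError
def Pre_chain_score (board : List (List Int)) : Prop :=
  4 ≤ board.length ∧ ∀ row ∈ board.take 4, 4 ≤ row.length

instance (board : List (List Int)) : Decidable (Pre_chain_score board) := by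
  unfold Pre_chain_score; infer_instance

def pvWitness_chain_score : List (List Int) :=
  [[2, 4, 0, 0], [0, 8, 0, 0], [0, 16, 0, 0], [0, 0, 0, 0]]

def Spec_chain_score (board : List (List Int)) (out : Int) : Prop := out = chain_score_alt board
instance (board : List (List Int)) (out : Int) : Decidable (Spec_chain_score board out) := by
  unfold Spec_chain_score; infer_instance

-- ===== CLAIM (what is proved, stated in full; the proofs are below) =====
def Claim_equal_chain_score : Prop :=
  ∀ (board : List (List Int)), Dom_chain_score board → Pre_chain_score board →
    Spec_chain_score board (chain_score board)

-- ===== LEMMAS AND PROOFS =====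

-- the common successor function: first in-bounds neighbor (left, up, down, right) holding 2*v, v ≠ 0
def pvNxt (board : List (List Int)) (rc : Int × Int) : Option (Int × Int) :=
  if pvVal board rc.1 rc.2 = 0 then none
  else [(rc.1, rc.2 - 1), (rc.1 - 1, rc.2), (rc.1 + 1, rc.2), (rc.1, rc.2 + 1)].find?
      (fun p => decide (0 ≤ p.1 ∧ p.1 < 4 ∧ 0 ≤ p.2 ∧ p.2 < 4 ∧
                        pvVal board p.1 p.2 = 2 * pvVal board rc.1 rc.2))

-- chain length with fuel
def pvClen (board : List (List Int)) : Nat → Int × Int → Int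
  | 0, _ => 0
  | f+1, rc =>
    match pvNxt board rc with
    | none => 0
    | some q => 1 + pvClen board f q

theorem pvClen_succ (board : List (List Int)) (f : Nat) (rc : Int × Int) :
    pvClen board (f+1) rc =
      match pvNxt board rc with
      | none => 0
      | some q => 1 + pvClen board f q := rfl

theorem pvClen_succ_none (board : List (List Int)) (f : Nat) (rc : Int × Int)
    (h : pvNxt board rc = none) : pvClen board (f+1) rc = 0 := by
  rw [pvClen_succ, h]

theorem pvClen_succ_some (board : List (List Int)) (f : Nat) (rc q : Int × Int)
    (h : pvNxt board rc = some q) : pvClen board (f+1) rc = 1 + pvClen board f q := by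
  rw [pvClen_succ, h]

theorem pvSomeGetD {α : Type} (o : Option α) (d : α) (h : o.isSome) : some (o.getD d) = o := by
  cases o <;> simp_all

-- A's comprehension equals the filtered left/up/down/right candidate list
set_option maxHeartbeats 2000000 in
theorem pvACoords_eq (rt ct : Int) :
    pvACoords rt ct =
      [(rt, ct - 1), (rt - 1, ct), (rt + 1, ct), (rt, ct + 1)].filter
        (fun p => decide (0 ≤ p.1 ∧ p.1 < 4 ∧ 0 ≤ p.2 ∧ p.2 < 4)) := by
  have h3 : PySem.List.pyRange 0 3 1 = [0, 1, 2] := by decide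
  have g0 : PySem.List.pyGetD pvShifts (0:Int) 0 = -1 := by decide
  have g1 : PySem.List.pyGetD pvShifts (1:Int) 0 = 0 := by decide
  have g2 : PySem.List.pyGetD pvShifts (2:Int) 0 = 1 := by decide
  simp only [pvACoords, h3, List.flatMap_cons, List.flatMap_nil, List.filter_cons,
    List.filter_nil, g0, g1, g2, List.append_nil]
  norm_num
  split_ifs <;> first | (exfalso; omega) | simp [g0, g1, g2, sub_eq_add_neg]

-- find? over a filtered list
theorem pvFindFilter (l : List (Int × Int)) (p q : (Int × Int) → Bool) :
    (l.filter p).find? q = l.find? (fun a => p a && q a) := by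
  induction l with
  | nil => rfl
  | cons a t ih =>
    by_cases hp : p a <;> by_cases hq : q a <;>
      simp [List.filter_cons, List.find?_cons, hp, hq, ih]

-- list.index selection = find?
theorem pvIndex_sel (xs : List (Int × Int)) (f : Int × Int → Int) (x : Int)
    (hx : x ∈ xs.map f) :
    PySem.List.pyGetD xs ((((PySem.List.index? (xs.map f) x).getD 0 : Nat) : Int)) ((0:Int), (0:Int))
      = ((xs.find? (fun p => decide (f p = x))).getD ((0:Int), (0:Int))) := by
  induction xs with
  | nil => simp at hx
  | cons y ys ih =>
    simp only [List.map_cons] at hx ⊢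
    by_cases hy : f y = x
    · rw [List.find?_cons_of_pos (by simp [hy]), hy, PySem.List.index?_cons_self]
      simp [PySem.List.pyGetD_natCast]
    · have hx' : x ∈ ys.map f := by
        rcases List.mem_cons.mp hx with h | h
        · exact absurd h.symm hy
        · exact h
      rw [List.find?_cons_of_neg (by simp [hy]), PySem.List.index?_cons_of_ne (List.map f ys) hy]
      obtain ⟨k, hk⟩ := Option.isSome_iff_exists.mp
        ((PySem.List.index?_isSome_iff _ _).mpr hx')
      have hih := ih hx'
      rw [hk] at hih ⊢
      simp only [Option.map_some, Option.getD_some]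
      rw [PySem.List.pyGetD_natCast]
      simpa [List.getD] using hih

-- one iteration of A's while loop decides and selects exactly pvNxt
theorem pvAStep (board : List (List Int)) (rt ct : Int) :
    (if 2 * pvVal board rt ct ∈ (pvACoords rt ct).map (fun p => pvVal board p.1 p.2) ∧
          pvVal board rt ct ≠ 0 then
        some (PySem.List.pyGetD (pvACoords rt ct)
          ((((PySem.List.index? ((pvACoords rt ct).map (fun p => pvVal board p.1 p.2))
              (2 * pvVal board rt ct)).getD 0 : Nat) : Int)) ((0:Int),(0:Int)))
      else none) = pvNxt board (rt, ct) := by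
  have hproj : pvNxt board (rt, ct) =
      (if pvVal board rt ct = 0 then none
       else [((rt:Int), ct - 1), (rt - 1, ct), (rt + 1, ct), (rt, ct + 1)].find?
         (fun p => decide (0 ≤ p.1 ∧ p.1 < 4 ∧ 0 ≤ p.2 ∧ p.2 < 4 ∧
           pvVal board p.1 p.2 = 2 * pvVal board rt ct))) := rfl
  by_cases hv : pvVal board rt ct = 0
  · simp [pvNxt, hv]
  · by_cases hmem : 2 * pvVal board rt ct ∈
        (pvACoords rt ct).map (fun p => pvVal board p.1 p.2)
    · rw [if_pos ⟨hmem, hv⟩, pvIndex_sel _ _ _ hmem, hproj, if_neg hv]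
      rw [pvACoords_eq] at hmem ⊢
      rw [pvFindFilter]
      have hpred : (fun a : Int × Int => (decide (0 ≤ a.1 ∧ a.1 < 4 ∧ 0 ≤ a.2 ∧ a.2 < 4)) &&
            decide (pvVal board a.1 a.2 = 2 * pvVal board rt ct)) =
          (fun a : Int × Int => decide (0 ≤ a.1 ∧ a.1 < 4 ∧ 0 ≤ a.2 ∧ a.2 < 4 ∧
            pvVal board a.1 a.2 = 2 * pvVal board rt ct)) := by
        funext a; simp [Bool.decide_and, Bool.and_assoc]
      rw [hpred]
      obtain ⟨q, hq, hqv⟩ := List.mem_map.mp hmem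
      have hmq := List.mem_filter.mp hq
      have hb := of_decide_eq_true hmq.2
      apply pvSomeGetD
      exact List.find?_isSome.mpr ⟨q, hmq.1,
        decide_eq_true ⟨hb.1, hb.2.1, hb.2.2.1, hb.2.2.2, hqv⟩⟩
    · rw [if_neg (by tauto)]
      cases hn : pvNxt board (rt, ct) with
      | none => rfl
      | some q =>
        exfalso
        rw [hproj, if_neg hv] at hn
        have hpq : 0 ≤ q.1 ∧ q.1 < 4 ∧ 0 ≤ q.2 ∧ q.2 < 4 ∧
            pvVal board q.1 q.2 = 2 * pvVal board rt ct := by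
          simpa using List.find?_some hn
        have hmemq := List.mem_of_find?_eq_some hn
        exact hmem (by
          rw [pvACoords_eq]
          exact List.mem_map.mpr ⟨q, List.mem_filter.mpr ⟨hmemq,
            decide_eq_true ⟨hpq.1, hpq.2.1, hpq.2.2.1, hpq.2.2.2.1⟩⟩, hpq.2.2.2.2⟩)

theorem pvALoop_eq_clen (board : List (List Int)) (f : Nat) :
    ∀ (rt ct out : Int), pvALoop board f rt ct out = out + pvClen board f (rt, ct) := by
  induction f with
  | zero => intro rt ct out; simp [pvALoop, pvClen]
  | succ f ih =>
    intro rt ct out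
    have hstep := pvAStep board rt ct
    cases hn : pvNxt board (rt, ct) with
    | none =>
      have hc : ¬ (2 * pvVal board rt ct ∈
          (pvACoords rt ct).map (fun p => pvVal board p.1 p.2) ∧ pvVal board rt ct ≠ 0) := by
        intro hc
        rw [if_pos hc, hn] at hstep
        exact absurd hstep (by simp)
      rw [pvClen_succ_none board f _ hn]
      simp only [pvALoop]
      rw [if_neg hc]
      omega
    | some q =>
      have hc : 2 * pvVal board rt ct ∈
          (pvACoords rt ct).map (fun p => pvVal board p.1 p.2) ∧ pvVal board rt ct ≠ 0 := by
        by_contra hc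
        rw [if_neg hc, hn] at hstep
        exact absurd hstep (by simp)
      rw [if_pos hc, hn] at hstep
      have hsel := Option.some.inj hstep
      rw [pvClen_succ_some board f _ q hn]
      simp only [pvALoop]
      rw [if_pos hc, ih, hsel]
      simp only [Prod.mk.eta]
      omega

-- the measure: number of cells with strictly larger absolute value
def pvCnt (board : List (List Int)) (rc : Int × Int) : Nat :=
  (pvBCells.filter (fun q => decide (|pvVal board rc.1 rc.2| < |pvVal board q.1 q.2|))).length

theorem pvMem_cells (p : Int × Int) :
    p ∈ pvBCells ↔ 0 ≤ p.1 ∧ p.1 < 4 ∧ 0 ≤ p.2 ∧ p.2 < 4 := by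
  simp only [pvBCells, List.mem_flatMap, List.mem_map, PySem.List.mem_pyRange_one]
  constructor
  · rintro ⟨r, ⟨hr1, hr2⟩, c, ⟨hc1, hc2⟩, rfl⟩
    exact ⟨hr1, hr2, hc1, hc2⟩
  · rintro ⟨h1, h2, h3, h4⟩
    exact ⟨p.1, ⟨h1, h2⟩, p.2, ⟨h3, h4⟩, rfl⟩

theorem pvNxt_spec (board : List (List Int)) (rc q : Int × Int) (h : pvNxt board rc = some q) :
    pvVal board rc.1 rc.2 ≠ 0 ∧ q ∈ pvBCells ∧
      pvVal board q.1 q.2 = 2 * pvVal board rc.1 rc.2 := by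
  unfold pvNxt at h
  by_cases hv : pvVal board rc.1 rc.2 = 0
  · rw [if_pos hv] at h; exact absurd h (by simp)
  · rw [if_neg hv] at h
    have hpq : 0 ≤ q.1 ∧ q.1 < 4 ∧ 0 ≤ q.2 ∧ q.2 < 4 ∧
        pvVal board q.1 q.2 = 2 * pvVal board rc.1 rc.2 := by
      simpa using List.find?_some h
    exact ⟨hv, (pvMem_cells q).mpr ⟨hpq.1, hpq.2.1, hpq.2.2.1, hpq.2.2.2.1⟩, hpq.2.2.2.2⟩

theorem pvCnt_lt (board : List (List Int)) (rc q : Int × Int) (h : pvNxt board rc = some q) :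
    pvCnt board q < pvCnt board rc := by
  obtain ⟨hv, hqc, hqv⟩ := pvNxt_spec board rc q h
  have habs : |pvVal board rc.1 rc.2| < |pvVal board q.1 q.2| := by
    rw [hqv, abs_mul, abs_two]
    have h1 : (0:Int) < |pvVal board rc.1 rc.2| := abs_pos.mpr hv
    omega
  unfold pvCnt
  obtain ⟨l1, l2, hs⟩ := List.append_of_mem hqc
  have key : ∀ (l : List (Int × Int)),
      (l.filter (fun x => decide (|pvVal board q.1 q.2| < |pvVal board x.1 x.2|))).length ≤
      (l.filter (fun x => decide (|pvVal board rc.1 rc.2| < |pvVal board x.1 x.2|))).length := by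
    intro l
    rw [← List.countP_eq_length_filter, ← List.countP_eq_length_filter]
    refine List.countP_mono_left ?_
    intro x _ hx
    have := of_decide_eq_true hx
    exact decide_eq_true (by omega)
  have hq1 : (decide (|pvVal board q.1 q.2| < |pvVal board q.1 q.2|)) = false := by simp
  have hq2 : (decide (|pvVal board rc.1 rc.2| < |pvVal board q.1 q.2|)) = true :=
    decide_eq_true habs
  have k1 := key l1
  have k2 := key l2
  rw [hs]
  simp only [List.filter_append, List.filter_cons, hq1, hq2, if_true, if_false,
    Bool.false_eq_true, List.length_append, List.length_cons]
  omega

theorem pvCnt_le (board : List (List Int)) (rc : Int × Int) : pvCnt board rc ≤ 16 := by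
  exact le_trans (List.length_filter_le _ _) (by decide)

theorem pvClen_stable (board : List (List Int)) (f : Nat) :
    ∀ rc, pvCnt board rc ≤ f → pvClen board (f+1) rc = pvClen board f rc := by
  induction f with
  | zero =>
    intro rc hle
    cases hn : pvNxt board rc with
    | none => rw [pvClen_succ_none board 0 rc hn]; rfl
    | some q => exact absurd (pvCnt_lt board rc q hn) (by omega)
  | succ f ih =>
    intro rc hle
    cases hn : pvNxt board rc with
    | none => rw [pvClen_succ_none board (f+1) rc hn, pvClen_succ_none board f rc hn]
    | some q =>
      rw [pvClen_succ_some board (f+1) rc q hn, pvClen_succ_some board f rc q hn]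
      have := pvCnt_lt board rc q hn
      rw [ih q (by omega)]

-- B's loop invariant: the table holds the true chain lengths of the processed prefix
theorem pvBInv (board : List (List Int)) (rest : List (Int × Int)) :
    ∀ (done : List (Int × Int)) (d : PySem.Dict (Int × Int) Int),
      pvBOrder board = done ++ rest →
      (∀ p, d.get? p = if p ∈ done then some (pvClen board 16 p) else none) →
      ∀ p, (rest.foldl (pvBStep board) d).get? p =
        if p ∈ done ++ rest then some (pvClen board 16 p) else none := by
  induction rest with
  | nil => intro done d horder hinv p; simpa using hinv p
  | cons rc rest' ih =>
    intro done d horder hinv p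
    have horder' : pvBOrder board = (done ++ [rc]) ++ rest' := by
      rw [horder]; simp
    have hinv' : ∀ p', (pvBStep board d rc).get? p' =
        if p' ∈ done ++ [rc] then some (pvClen board 16 p') else none := by
      intro p'
      unfold pvBStep
      by_cases hv : pvVal board rc.1 rc.2 = 0
      · rw [if_neg (by simpa using hv)]
        have hn : pvNxt board rc = none := by unfold pvNxt; rw [if_pos hv]
        rw [PySem.Dict.get?_insert]
        by_cases hpr : p' = rc
        · rw [if_pos hpr, hpr]
          rw [if_pos (by simp)]
          rw [show (16:Nat) = 15+1 from rfl, pvClen_succ_none board 15 rc hn]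
        · rw [if_neg hpr, hinv p']
          by_cases hpd : p' ∈ done
          · rw [if_pos hpd, if_pos (by simp [hpd])]
          · rw [if_neg hpd, if_neg (by simp [hpd, hpr])]
      · rw [if_pos hv]
        cases hf : [(rc.1, rc.2 - 1), (rc.1 - 1, rc.2), (rc.1 + 1, rc.2), (rc.1, rc.2 + 1)].find?
            (fun pp => decide (0 ≤ pp.1 ∧ pp.1 < 4 ∧ 0 ≤ pp.2 ∧ pp.2 < 4 ∧
              pvVal board pp.1 pp.2 = 2 * pvVal board rc.1 rc.2)) with
        | none =>
          have hn : pvNxt board rc = none := by unfold pvNxt; rw [if_neg hv]; exact hf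
          rw [PySem.Dict.get?_insert]
          by_cases hpr : p' = rc
          · rw [if_pos hpr, hpr, if_pos (by simp)]
            rw [show (16:Nat) = 15+1 from rfl, pvClen_succ_none board 15 rc hn]
          · rw [if_neg hpr, hinv p']
            by_cases hpd : p' ∈ done
            · rw [if_pos hpd, if_pos (by simp [hpd])]
            · rw [if_neg hpd, if_neg (by simp [hpd, hpr])]
        | some q =>
          have hn : pvNxt board rc = some q := by unfold pvNxt; rw [if_neg hv]; exact hf
          obtain ⟨_, hqcells, hqv⟩ := pvNxt_spec board rc q hn
          have hqne : q ≠ rc := by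
            intro e
            rw [e] at hqv
            omega
          -- q was processed earlier: it lies in done
          have hqdone : q ∈ done := by
            have hpw := PySem.List.sorted_pairwise pvBCells
              (fun x => -|pvVal board x.1 x.2|)
            rw [show PySem.List.sorted pvBCells (fun x => -|pvVal board x.1 x.2|) =
                pvBOrder board from rfl, horder] at hpw
            have hqorder : q ∈ pvBOrder board := by
              unfold pvBOrder
              rw [PySem.List.mem_sorted]
              exact hqcells
            rw [horder] at hqorder
            rcases List.mem_append.mp hqorder with h | h
            · exact h
            · exfalso
              have hpw2 := (List.pairwise_append.mp hpw).2.1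
              have hq' : q ∈ rest' := by
                rcases List.mem_cons.mp h with e | e
                · exact absurd e hqne
                · exact e
              have hle := List.rel_of_pairwise_cons hpw2 hq'
              simp only at hle
              have habs : |pvVal board rc.1 rc.2| < |pvVal board q.1 q.2| := by
                rw [hqv, abs_mul, abs_two]
                have h1 : (0:Int) < |pvVal board rc.1 rc.2| := abs_pos.mpr hv
                omega
              omega
          have hgq : (d.insert rc 0).getD q 0 = pvClen board 16 q := by
            rw [PySem.Dict.getD_eq_get?_getD, PySem.Dict.get?_insert, if_neg hqne,
              hinv q, if_pos hqdone]
            rfl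
          change ((d.insert rc 0).insert rc (1 + (d.insert rc 0).getD q 0)).get? p' = _
          rw [hgq, PySem.Dict.get?_insert]
          by_cases hpr : p' = rc
          · rw [if_pos hpr, hpr, if_pos (by simp)]
            have hstable : pvClen board 16 q = pvClen board 15 q := by
              have h1 := pvCnt_lt board rc q hn
              have h2 := pvCnt_le board rc
              exact pvClen_stable board 15 q (by omega)
            rw [show (16:Nat) = 15+1 from rfl, pvClen_succ_some board 15 rc q hn, ← hstable]
          · rw [if_neg hpr, PySem.Dict.get?_insert, if_neg hpr, hinv p']
            by_cases hpd : p' ∈ done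
            · rw [if_pos hpd, if_pos (by simp [hpd])]
            · rw [if_neg hpd, if_neg (by simp [hpd, hpr])]
    have hres := ih (done ++ [rc]) (pvBStep board d rc) horder' hinv' p
    rw [List.foldl_cons, hres]
    have hmemiff : p ∈ (done ++ [rc]) ++ rest' ↔ p ∈ done ++ rc :: rest' := by simp
    by_cases hp : p ∈ done ++ rc :: rest'
    · rw [if_pos (hmemiff.mpr hp), if_pos hp]
    · rw [if_neg (fun hx => hp (hmemiff.mp hx)), if_neg hp]

-- ===== VERDICT (by name: the statement is the Claim_ definition above) =====
set_option maxHeartbeats 4000000 in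
theorem chain_score_spec : Claim_equal_chain_score := by
  intro board _ _
  unfold Spec_chain_score
  have hA : ∀ rt ct out : Int, pvALoop board 17 rt ct out = out + pvClen board 16 (rt, ct) := by
    intro rt ct out
    rw [pvALoop_eq_clen]
    rw [show (17:Nat) = 16+1 from rfl,
      pvClen_stable board 16 (rt, ct) (pvCnt_le board (rt, ct))]
  have hT : ∀ p : Int × Int, p ∈ pvBCells →
      ((pvBOrder board).foldl (pvBStep board) PySem.Dict.empty).getD p 0 =
        pvClen board 16 p := by
    intro p hp
    have hinv := pvBInv board (pvBOrder board) [] PySem.Dict.empty (List.nil_append _).symm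
      (by intro p'; simp [PySem.Dict.get?_empty]) p
    have hmem : p ∈ pvBOrder board := by
      unfold pvBOrder; rw [PySem.List.mem_sorted]; exact hp
    rw [PySem.Dict.getD_eq_get?_getD, hinv,
      if_pos (List.mem_append.mpr (Or.inr hmem))]
    rfl
  unfold chain_score chain_score_alt
  simp only []
  rw [show PySem.List.pyRange 0 4 1 = [0, 1, 2, 3] from by decide]
  simp only [List.foldl_cons, List.foldl_nil, hA]
  rw [show pvBCells = [((0:Int), (0:Int)), ((0:Int), (1:Int)), ((0:Int), (2:Int)), ((0:Int), (3:Int)), ((1:Int), (0:Int)), ((1:Int), (1:Int)), ((1:Int), (2:Int)), ((1:Int), (3:Int)), ((2:Int), (0:Int)), ((2:Int), (1:Int)), ((2:Int), (2:Int)), ((2:Int), (3:Int)), ((3:Int), (0:Int)), ((3:Int), (1:Int)), ((3:Int), (2:Int)), ((3:Int), (3:Int))] from by decide]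
  simp only [List.foldl_cons, List.foldl_nil]
  rw [hT ((0:Int), (0:Int)) (by decide)]
  rw [hT ((0:Int), (1:Int)) (by decide)]
  rw [hT ((0:Int), (2:Int)) (by decide)]
  rw [hT ((0:Int), (3:Int)) (by decide)]
  rw [hT ((1:Int), (0:Int)) (by decide)]
  rw [hT ((1:Int), (1:Int)) (by decide)]
  rw [hT ((1:Int), (2:Int)) (by decide)]
  rw [hT ((1:Int), (3:Int)) (by decide)]
  rw [hT ((2:Int), (0:Int)) (by decide)]
  rw [hT ((2:Int), (1:Int)) (by decide)]
  rw [hT ((2:Int), (2:Int)) (by decide)]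
  rw [hT ((2:Int), (3:Int)) (by decide)]
  rw [hT ((3:Int), (0:Int)) (by decide)]
  rw [hT ((3:Int), (1:Int)) (by decide)]
  rw [hT ((3:Int), (2:Int)) (by decide)]
  rw [hT ((3:Int), (3:Int)) (by decide)]
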